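-- pv_equiv track=rewrite | github.com/marian37/advent-of-code-2024 | 14.py | check_robots
-- ===== SOURCE A (Python) =====
-- def check_robots(positions):
--     for row in range(len(positions)):
--         subsequent = 0
--         for col in range(len(positions[row])):
--             if positions[row][col] == "#":
--                 subsequent += 1
--             else:
--                 subsequent = 0
--             if subsequent > 10:
--                 return True
--     return False
-- ===== SOURCE B (Python) =====
-- def check_robots(positions):
--     for row in positions:
--         i, n = 0, len(row)
--         while i < n:
--             j = i
--             while j < n and row[j] == row[i]:
--                 j += 1
--             if row[i] == "#" and j - i > 10:
--                 return True
--             i = j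
--     return False
-- ===== Notes on version B (the rewrite author's own statement) =====
-- stated objective: alternative
-- what changed: B decomposes each row into maximal runs of equal characters with a two-pointer scan and tests each run's length, instead of A's per-character counter with reset.
import Mathlib
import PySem

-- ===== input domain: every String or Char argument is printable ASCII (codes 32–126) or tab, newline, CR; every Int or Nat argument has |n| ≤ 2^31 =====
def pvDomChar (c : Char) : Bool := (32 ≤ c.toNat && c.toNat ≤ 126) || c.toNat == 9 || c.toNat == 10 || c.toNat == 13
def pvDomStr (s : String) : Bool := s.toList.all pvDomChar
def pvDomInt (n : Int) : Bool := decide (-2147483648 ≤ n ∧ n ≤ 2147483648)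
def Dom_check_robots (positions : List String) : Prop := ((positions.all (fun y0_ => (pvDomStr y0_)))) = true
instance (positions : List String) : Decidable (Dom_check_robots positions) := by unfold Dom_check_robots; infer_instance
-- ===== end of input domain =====

-- B replaces A's per-character counter (reset on non-'#') with a two-pointer decomposition of each
-- row into maximal runs of equal characters, testing each run's length; same cost, different structure.

-- ===== PORT A =====
-- inner loop of A: per-character scan carrying the current count of consecutive '#'
def rowA : List Char → Nat → Bool
  | [], _ => false
  | c :: rest, subsequent =>
    let s := if c = '#' then subsequent + 1 else 0
    if s > 10 then true else rowA rest s

def check_robots : List String → Bool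
  | [] => false
  | row :: rows => if rowA row.toList 0 then true else check_robots rows

-- ===== PORT B =====
-- inner loop of B: split off the maximal run of the head character, test it, recurse on the rest
def rowB : List Char → Bool
  | [] => false
  | c :: rest =>
    let same := rest.takeWhile (· = c)
    let other := rest.dropWhile (· = c)
    if c = '#' ∧ same.length + 1 > 10 then true else rowB other
termination_by cs => cs.length
decreasing_by
  simp only [List.length_cons]
  exact Nat.lt_succ_of_le (List.length_dropWhile_le _ _)

def check_robots_alt : List String → Bool
  | [] => false
  | row :: rows => if rowB row.toList then true else check_robots_alt rows

-- ===== PRECONDITION & SPEC =====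
def Spec_check_robots (positions : List String) (out : Bool) : Prop := out = check_robots_alt positions
instance (positions : List String) (out : Bool) : Decidable (Spec_check_robots positions out) := by unfold Spec_check_robots; infer_instance

-- ===== CLAIM (what is proved, stated in full; the proofs are below) =====
def Claim_equal_check_robots : Prop := ∀ (positions : List String), Dom_check_robots positions → Spec_check_robots positions (check_robots positions)

-- ===== LEMMAS AND PROOFS =====

-- scanning a block of m '#'s from count s (s ≤ 10) either crosses the threshold or continues with s+m
lemma rowA_hash_block (m : Nat) (other : List Char) :
    ∀ s : Nat, s ≤ 10 →
      rowA (List.replicate m '#' ++ other) s =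
        if 10 < s + m then true else rowA other (s + m) := by
  induction m with
  | zero =>
    intro s hs
    simp only [List.replicate_zero, List.nil_append]
    rw [if_neg (by omega : ¬ 10 < s + 0)]
    rfl
  | succ k ih =>
    intro s hs
    rw [List.replicate_succ, List.cons_append]
    by_cases h : 10 < s + 1
    · simp [rowA, show s = 10 by omega]
    · rw [show rowA ('#' :: (List.replicate k '#' ++ other)) s
            = rowA (List.replicate k '#' ++ other) (s + 1) by simp [rowA, show ¬ 10 < s + 1 from h]]
      rw [ih (s + 1) (by omega), show s + 1 + k = s + (k + 1) by omega]

-- scanning a block of a non-'#' character just skips it (the counter stays 0)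
lemma rowA_non_hash_block (c : Char) (hc : c ≠ '#') (m : Nat) (other : List Char) :
    rowA (List.replicate m c ++ other) 0 = rowA other 0 := by
  induction m with
  | zero => simp
  | succ k ih =>
    rw [List.replicate_succ, List.cons_append]
    simp only [rowA, hc, if_false]
    exact ih

-- the carried counter is irrelevant when the list is empty or starts with a non-'#' character
lemma rowA_restart (other : List Char) (s : Nat)
    (h : ∀ d ds, other = d :: ds → d ≠ '#') : rowA other s = rowA other 0 := by
  cases other with
  | nil => simp [rowA]
  | cons d ds => simp [rowA, h d ds rfl]

lemma row_eq (cs : List Char) : rowA cs 0 = rowB cs := by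
  induction hn : cs.length using Nat.strong_induction_on generalizing cs with
  | _ n ih =>
  cases cs with
  | nil => simp [rowA, rowB]
  | cons c rest =>
    set same := rest.takeWhile (· = c) with hsame
    set other := rest.dropWhile (· = c) with hother
    have hsplit : same ++ other = rest := List.takeWhile_append_dropWhile
    have hrepl : same = List.replicate same.length c := by
      apply List.eq_replicate_of_mem
      intro b hb
      have := List.mem_takeWhile_imp (hsame ▸ hb)
      simpa using this
    have hcs : c :: rest = List.replicate (same.length + 1) c ++ other := by
      rw [List.replicate_succ, List.cons_append, ← hrepl, hsplit]
    have hlen : other.length < n := by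
      have h1 : other.length ≤ rest.length := by
        rw [hother]; exact List.length_dropWhile_le _ _
      have h2 : rest.length + 1 = n := by simpa using hn
      omega
    have hother_head : ∀ d ds, other = d :: ds → d ≠ c := by
      intro d ds hdd
      have h3 := List.head?_dropWhile_not (· = c) rest
      rw [← hother, hdd] at h3
      simpa using h3
    have hB : rowB (c :: rest) = if c = '#' ∧ same.length + 1 > 10 then true else rowB other := by
      rw [rowB]
    by_cases hc : c = '#'
    · subst hc
      have hA : rowA ('#' :: rest) 0
          = if 10 < 0 + (same.length + 1) then true else rowA other (0 + (same.length + 1)) := by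
        rw [hcs]; exact rowA_hash_block (same.length + 1) other 0 (by omega)
      rw [hA, hB]
      simp only [true_and, gt_iff_lt, Nat.zero_add]
      by_cases hlong : 10 < same.length + 1
      · simp [hlong]
      · simp only [hlong, if_false]
        rw [rowA_restart other _ (fun d ds hdd => hother_head d ds hdd)]
        exact ih other.length hlen other rfl
    · have hA : rowA (c :: rest) 0 = rowA other 0 := by
        rw [hcs]; exact rowA_non_hash_block c hc (same.length + 1) other
      rw [hA, hB]
      simp only [hc, false_and, if_false]
      exact ih other.length hlen other rfl

lemma check_eq (positions : List String) : check_robots positions = check_robots_alt positions := by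
  induction positions with
  | nil => rfl
  | cons row rows ih => simp only [check_robots, check_robots_alt, row_eq, ih]

-- ===== VERDICT (by name: the statement is the Claim_ definition above) =====
theorem check_robots_spec : Claim_equal_check_robots := by
  intro positions _
  exact check_eq positions
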